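-- pv_equiv track=rewrite | github.com/charleslo/opentuner | examples/mario/mario.py | fm2_lines
-- ===== SOURCE A (Python) =====
-- def fm2_line(up, down, left, right, a, b, start, select, reset=False):
--   """formats one frame of input with the given button presses"""
--   return ''.join(('|1|' if reset else '|0|') +
--     ('R' if right else '.') +
--     ('L' if left else '.') +
--     ('D' if down else '.') +
--     ('U' if up else '.') +
--     ('T' if start else '.') +
--     ('D' if select else '.') +
--     ('B' if b else '.') +
--     ('A' if a else '.') +
--     '|........||')
--
-- def maxd(iterable, default):
--   try:
--     return max(iterable)
--   except ValueError:
--     return default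
--
-- def fm2_lines(up, down, left, right, a, b, start, select, reset=set(), minFrame=None, maxFrame=None):
--   """formats many frames using the given button-press sets"""
--   if minFrame is None:
--     minFrame = 0
--   if maxFrame is None:
--     maxFrame = max(maxd(up, 0), maxd(down, 0), maxd(left, 0), maxd(right, 0), maxd(a, 0), maxd(b, 0), maxd(start, 0), maxd(select, 0), maxd(reset, 0)) + 1
--   lines = list()
--   for i in range(minFrame, maxFrame):
--     lines.append(fm2_line(i in up, i in down, i in left, i in right, i in a, i in b, i in start, i in select, i in reset))
--   return lines
-- ===== SOURCE B (Python) =====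
-- def fm2_lines(up, down, left, right, a, b, start, select, reset=set(), minFrame=None, maxFrame=None):
--   """formats many frames using the given button-press sets (table-scatter version)"""
--   if minFrame is None:
--     minFrame = 0
--   sets = (up, down, left, right, a, b, start, select, reset)
--   if maxFrame is None:
--     maxFrame = max(max(s, default=0) for s in sets) + 1
--   n = maxFrame - minFrame
--   if n < 0:
--     n = 0
--   table = [[False] * 9 for _ in range(n)]
--   for k, s in enumerate(sets):
--     for x in s:
--       if minFrame <= x < maxFrame:
--         table[x - minFrame][k] = True
--   lines = []
--   for row in table:
--     lines.append(
--       ('|1|' if row[8] else '|0|') +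
--       ('R' if row[3] else '.') +
--       ('L' if row[2] else '.') +
--       ('D' if row[1] else '.') +
--       ('U' if row[0] else '.') +
--       ('T' if row[6] else '.') +
--       ('D' if row[7] else '.') +
--       ('B' if row[5] else '.') +
--       ('A' if row[4] else '.') +
--       '|........||')
--   return lines
-- ===== Notes on version B (the rewrite author's own statement) =====
-- stated objective: alternative
-- what changed: Replaces the per-frame gather (nine list-membership tests for every frame in range) by a scatter: allocate one 9-flag record per frame, walk each button list once setting the in-range flags, then map each record to its FM2 line.
import Mathlib
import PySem

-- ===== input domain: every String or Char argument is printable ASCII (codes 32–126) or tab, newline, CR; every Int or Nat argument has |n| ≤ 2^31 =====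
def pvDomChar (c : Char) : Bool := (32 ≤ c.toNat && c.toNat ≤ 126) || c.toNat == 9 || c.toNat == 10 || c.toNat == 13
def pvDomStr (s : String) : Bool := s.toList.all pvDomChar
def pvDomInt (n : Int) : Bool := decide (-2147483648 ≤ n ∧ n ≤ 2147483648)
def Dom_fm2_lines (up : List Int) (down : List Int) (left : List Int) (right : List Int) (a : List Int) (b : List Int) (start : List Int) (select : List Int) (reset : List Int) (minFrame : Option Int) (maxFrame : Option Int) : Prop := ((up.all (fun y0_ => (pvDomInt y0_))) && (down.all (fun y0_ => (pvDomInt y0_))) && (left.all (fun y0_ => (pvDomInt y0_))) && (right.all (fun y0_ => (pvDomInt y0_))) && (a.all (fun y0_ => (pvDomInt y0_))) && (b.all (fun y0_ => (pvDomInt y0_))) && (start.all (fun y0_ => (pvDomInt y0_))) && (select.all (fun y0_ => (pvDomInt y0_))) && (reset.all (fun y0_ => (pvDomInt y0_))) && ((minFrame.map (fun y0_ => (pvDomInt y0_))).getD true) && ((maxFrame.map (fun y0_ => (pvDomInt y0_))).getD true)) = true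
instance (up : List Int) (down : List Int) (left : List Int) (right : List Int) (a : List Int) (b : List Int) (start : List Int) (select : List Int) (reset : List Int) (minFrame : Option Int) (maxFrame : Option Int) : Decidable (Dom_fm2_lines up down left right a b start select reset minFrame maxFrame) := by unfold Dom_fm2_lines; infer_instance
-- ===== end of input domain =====

-- ===== PORT A =====
-- B replaces A's per-frame gather (nine membership tests per frame) by a one-pass scatter into
-- a per-frame flag table; alternative decomposition, same return value.

def fm2_line (up down left right a b start select reset : Bool) : String :=
  (if reset then "|1|" else "|0|") ++
  (if right then "R" else ".") ++
  (if left then "L" else ".") ++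
  (if down then "D" else ".") ++
  (if up then "U" else ".") ++
  (if start then "T" else ".") ++
  (if select then "D" else ".") ++
  (if b then "B" else ".") ++
  (if a then "A" else ".") ++
  "|........||"

-- maxd: Python max(iterable) (ValueError on empty caught, returning default)
def maxd (xs : List Int) (d : Int) : Int :=
  match PySem.List.max? xs id with
  | some m => m
  | none => d

def fm2_lines (up : List Int) (down : List Int) (left : List Int) (right : List Int) (a : List Int) (b : List Int) (start : List Int) (select : List Int) (reset : List Int) (minFrame : Option Int) (maxFrame : Option Int) : List String :=
  let minF : Int := match minFrame with | none => 0 | some m => m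
  let maxF : Int := match maxFrame with
    | some m => m
    | none =>
        max (maxd up 0) (max (maxd down 0) (max (maxd left 0) (max (maxd right 0)
          (max (maxd a 0) (max (maxd b 0) (max (maxd start 0)
            (max (maxd select 0) (maxd reset 0)))))))) + 1
  (PySem.List.pyRange minF maxF 1).foldl
    (fun lines i => lines ++
      [fm2_line (up.contains i) (down.contains i) (left.contains i) (right.contains i)
        (a.contains i) (b.contains i) (start.contains i) (select.contains i) (reset.contains i)])
    []

-- ===== PORT B =====
-- formats one row of the flag table (row[8] = reset, row[3] = right, ..., as in Source B)
def fm2_row_line (row : List Bool) : String :=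
  (if PySem.List.pyGetD row 8 false then "|1|" else "|0|") ++
  (if PySem.List.pyGetD row 3 false then "R" else ".") ++
  (if PySem.List.pyGetD row 2 false then "L" else ".") ++
  (if PySem.List.pyGetD row 1 false then "D" else ".") ++
  (if PySem.List.pyGetD row 0 false then "U" else ".") ++
  (if PySem.List.pyGetD row 6 false then "T" else ".") ++
  (if PySem.List.pyGetD row 7 false then "D" else ".") ++
  (if PySem.List.pyGetD row 5 false then "B" else ".") ++
  (if PySem.List.pyGetD row 4 false then "A" else ".") ++
  "|........||"

-- inner scatter loop of Source B: walk one button list, set flag k of the frame's row for in-range frames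
def fm2_scatter (minF maxF : Int) (k : Nat) (xs : List Int) (t : List (List Bool)) : List (List Bool) :=
  xs.foldl (fun t x =>
    if minF ≤ x ∧ x < maxF then t.modify (x - minF).toNat (fun row => row.set k true) else t) t

def fm2_lines_alt (up : List Int) (down : List Int) (left : List Int) (right : List Int) (a : List Int) (b : List Int) (start : List Int) (select : List Int) (reset : List Int) (minFrame : Option Int) (maxFrame : Option Int) : List String :=
  let minF : Int := match minFrame with | none => 0 | some m => m
  let sets : List (List Int) := [up, down, left, right, a, b, start, select, reset]
  let maxF : Int := match maxFrame with
    | some m => m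
    | none => (PySem.List.max? (sets.map (fun s => (PySem.List.max? s id).getD 0)) id).getD 0 + 1
  let n : Nat := (maxF - minF).toNat
  let t0 : List (List Bool) := List.replicate n (List.replicate 9 false)
  let t : List (List Bool) :=
    (PySem.List.enumerate sets 0).foldl (fun t p => fm2_scatter minF maxF p.1.toNat p.2 t) t0
  t.map fm2_row_line

-- ===== PRECONDITION & SPEC =====
def Spec_fm2_lines (up : List Int) (down : List Int) (left : List Int) (right : List Int) (a : List Int) (b : List Int) (start : List Int) (select : List Int) (reset : List Int) (minFrame : Option Int) (maxFrame : Option Int) (out : List String) : Prop := out = fm2_lines_alt up down left right a b start select reset minFrame maxFrame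
instance (up : List Int) (down : List Int) (left : List Int) (right : List Int) (a : List Int) (b : List Int) (start : List Int) (select : List Int) (reset : List Int) (minFrame : Option Int) (maxFrame : Option Int) (out : List String) : Decidable (Spec_fm2_lines up down left right a b start select reset minFrame maxFrame out) := by unfold Spec_fm2_lines; infer_instance

-- ===== CLAIM (what is proved, stated in full; the proofs are below) =====
def Claim_equal_fm2_lines : Prop := ∀ (up : List Int) (down : List Int) (left : List Int) (right : List Int) (a : List Int) (b : List Int) (start : List Int) (select : List Int) (reset : List Int) (minFrame : Option Int) (maxFrame : Option Int), Dom_fm2_lines up down left right a b start select reset minFrame maxFrame → Spec_fm2_lines up down left right a b start select reset minFrame maxFrame (fm2_lines up down left right a b start select reset minFrame maxFrame)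

-- ===== LEMMAS AND PROOFS =====

theorem maxd_eq_getD (xs : List Int) (d : Int) : maxd xs d = (PySem.List.max? xs id).getD d := by
  unfold maxd; cases PySem.List.max? xs id <;> rfl

theorem max9_eq (v0 v1 v2 v3 v4 v5 v6 v7 v8 : Int) :
    (PySem.List.max? [v0, v1, v2, v3, v4, v5, v6, v7, v8] id).getD 0
      = max v0 (max v1 (max v2 (max v3 (max v4 (max v5 (max v6 (max v7 v8))))))) := by
  obtain ⟨m, hm⟩ : ∃ m, PySem.List.max? [v0, v1, v2, v3, v4, v5, v6, v7, v8] id = some m := by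
    cases h : PySem.List.max? [v0, v1, v2, v3, v4, v5, v6, v7, v8] id with
    | none => exact absurd ((PySem.List.max?_eq_none_iff _ _).mp h) (by simp)
    | some m => exact ⟨m, rfl⟩
  have hmem := PySem.List.max?_mem hm
  have hmax := PySem.List.max?_isMax hm
  rw [hm]
  simp only [Option.getD_some]
  apply le_antisymm
  · simp only [List.mem_cons, List.not_mem_nil, or_false] at hmem
    rcases hmem with h|h|h|h|h|h|h|h|h <;> subst h <;> simp
  · simp only [max_le_iff]
    refine ⟨hmax _ (by simp), hmax _ (by simp), hmax _ (by simp), hmax _ (by simp),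
      hmax _ (by simp), hmax _ (by simp), hmax _ (by simp), hmax _ (by simp), hmax _ (by simp)⟩

theorem scatter_get (minF maxF : Int) (k : Nat) (xs : List Int) (t : List (List Bool)) (j : Nat) :
    (fm2_scatter minF maxF k xs t)[j]? =
      if xs.contains (minF + (j : Int)) && decide (minF + (j : Int) < maxF) then
        (t[j]?).map (fun r => r.set k true)
      else t[j]? := by
  induction xs generalizing t with
  | nil => simp [fm2_scatter]
  | cons x xs ih =>
    simp only [fm2_scatter, List.foldl_cons] at *
    rw [ih]
    by_cases hx : minF ≤ x ∧ x < maxF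
    · simp only [if_pos hx]
      by_cases hxv : x = minF + (j : Int)
      · have hidx : (x - minF).toNat = j := by omega
        rw [hidx]
        have hget : (t.modify j (fun row => row.set k true))[j]? =
            (t[j]?).map (fun r => r.set k true) := by
          rw [List.getElem?_modify]; cases t[j]? <;> simp
        rw [hget]
        have hc : (x :: xs).contains (minF + (j : Int)) = true := by
          rw [List.contains_cons]; simp [hxv]
        have hlt : decide (minF + (j : Int) < maxF) = true := by
          simp only [decide_eq_true_eq]; omega
        rw [hc, hlt]
        cases hm : xs.contains (minF + (j : Int)) <;>
          cases t[j]? <;> simp [List.set_set]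
      · have hidx : (x - minF).toNat ≠ j := by omega
        have hget : (t.modify (x - minF).toNat (fun row => row.set k true))[j]? = t[j]? := by
          rw [List.getElem?_modify]; cases t[j]? <;> simp [hidx]
        rw [hget]
        have hc : (x :: xs).contains (minF + (j : Int)) = xs.contains (minF + (j : Int)) := by
          rw [List.contains_cons]
          have hne : ((minF + (j : Int)) == x) = false := by
            simp only [beq_eq_false_iff_ne]; omega
          rw [hne, Bool.false_or]
        rw [hc]
    · simp only [if_neg hx]
      by_cases hxv : x = minF + (j : Int)
      · have hlt : decide (minF + (j : Int) < maxF) = false := by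
          simp only [decide_eq_false_iff_not]; omega
        rw [hlt]; simp
      · have hc : (x :: xs).contains (minF + (j : Int)) = xs.contains (minF + (j : Int)) := by
          rw [List.contains_cons]
          have hne : ((minF + (j : Int)) == x) = false := by
            simp only [beq_eq_false_iff_ne]; omega
          rw [hne, Bool.false_or]
        rw [hc]

theorem fm2_core (minF maxF : Int) (up down left right a b start select reset : List Int) :
    (PySem.List.pyRange minF maxF 1).foldl
      (fun lines i => lines ++
        [fm2_line (up.contains i) (down.contains i) (left.contains i) (right.contains i)
          (a.contains i) (b.contains i) (start.contains i) (select.contains i) (reset.contains i)]) []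
    = ((PySem.List.enumerate [up, down, left, right, a, b, start, select, reset] 0).foldl
        (fun t p => fm2_scatter minF maxF p.1.toNat p.2 t)
        (List.replicate (maxF - minF).toNat (List.replicate 9 false))).map fm2_row_line := by
  have henum : PySem.List.enumerate [up, down, left, right, a, b, start, select, reset] (0 : Int) =
      [(0, up), (1, down), (2, left), (3, right), (4, a), (5, b), (6, start), (7, select),
        (8, reset)] := rfl
  rw [PySem.List.foldl_append_singleton_eq_map, List.nil_append, henum]
  simp only [List.foldl_cons, List.foldl_nil]
  apply List.ext_getElem?
  intro i
  simp only [List.getElem?_map, PySem.List.getElem?_pyRange_one, scatter_get,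
    List.getElem?_replicate]
  by_cases h : i < (maxF - minF).toNat
  · have hlt : decide (minF + (i : Int) < maxF) = true := by
      simp only [decide_eq_true_eq]; omega
    simp only [if_pos h, hlt, Bool.and_true, Option.map_some, show (((0:Int)).toNat = 0) from rfl, show (((1:Int)).toNat = 1) from rfl, show (((2:Int)).toNat = 2) from rfl, show (((3:Int)).toNat = 3) from rfl, show (((4:Int)).toNat = 4) from rfl, show (((5:Int)).toNat = 5) from rfl, show (((6:Int)).toNat = 6) from rfl, show (((7:Int)).toNat = 7) from rfl, show (((8:Int)).toNat = 8) from rfl]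
    generalize up.contains (minF + (i : Int)) = c0
    generalize down.contains (minF + (i : Int)) = c1
    generalize left.contains (minF + (i : Int)) = c2
    generalize right.contains (minF + (i : Int)) = c3
    generalize a.contains (minF + (i : Int)) = c4
    generalize b.contains (minF + (i : Int)) = c5
    generalize start.contains (minF + (i : Int)) = c6
    generalize select.contains (minF + (i : Int)) = c7
    generalize reset.contains (minF + (i : Int)) = c8
    cases c0 <;> cases c1 <;> cases c2 <;> cases c3 <;> cases c4 <;>
      cases c5 <;> cases c6 <;> cases c7 <;> cases c8 <;> rfl
  · simp only [if_neg h, Option.map_none, ite_self]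

-- ===== VERDICT (by name: the statement is the Claim_ definition above) =====
theorem fm2_lines_spec : Claim_equal_fm2_lines := by
  intro up down left right a b start select reset minFrame maxFrame _
  unfold Spec_fm2_lines
  have h9 : (PySem.List.max? ([up, down, left, right, a, b, start, select, reset].map
        (fun s => (PySem.List.max? s id).getD 0)) id).getD 0
      = max (maxd up 0) (max (maxd down 0) (max (maxd left 0) (max (maxd right 0)
          (max (maxd a 0) (max (maxd b 0) (max (maxd start 0)
            (max (maxd select 0) (maxd reset 0)))))))) := by
    simp only [List.map_cons, List.map_nil]
    rw [max9_eq]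
    simp only [maxd_eq_getD]
  simp only [fm2_lines, fm2_lines_alt]
  cases minFrame <;> cases maxFrame <;> simp only [] <;>
    first
      | exact fm2_core _ _ up down left right a b start select reset
      | (rw [← h9]; exact fm2_core _ _ up down left right a b start select reset)
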